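-- pv_equiv track=rewrite | github.com/sijapu17/Advent-of-Code | 2018/2018-2.py | nInString
-- ===== SOURCE A (Python) =====
-- def nInString(text,n): #Check whether a substring of exactly n identical chars exists in a string
--     prev=text[0]
--     count=1
--     for i in range(1,len(text)):
--         if text[i]==prev:
--             count+=1
--         else:
--             if count==n:
--                 return(True)
--             count=1
--             prev=text[i]
--     return(count==n)
-- ===== SOURCE B (Python) =====
-- def nInString(text, n):
--     # Brute force over candidate start positions: a maximal run of length
--     # exactly n exists iff some window text[i:i+n] is constant with differing
--     # (or absent) neighbours on both sides.
--     L = len(text)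
--     return n >= 1 and any(
--         i + n <= L
--         and (i == 0 or text[i - 1] != text[i])
--         and all(text[j] == text[i] for j in range(i, i + n))
--         and (i + n == L or text[i + n] != text[i])
--         for i in range(L)
--     )
-- ===== Notes on version B (the rewrite author's own statement) =====
-- stated objective: alternative
-- what changed: B replaces A's linear prev/count state machine by a quadratic brute-force scan over candidate start positions, testing each window text[i:i+n] for constancy with differing (or absent) neighbours on both sides.
import Mathlib
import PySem

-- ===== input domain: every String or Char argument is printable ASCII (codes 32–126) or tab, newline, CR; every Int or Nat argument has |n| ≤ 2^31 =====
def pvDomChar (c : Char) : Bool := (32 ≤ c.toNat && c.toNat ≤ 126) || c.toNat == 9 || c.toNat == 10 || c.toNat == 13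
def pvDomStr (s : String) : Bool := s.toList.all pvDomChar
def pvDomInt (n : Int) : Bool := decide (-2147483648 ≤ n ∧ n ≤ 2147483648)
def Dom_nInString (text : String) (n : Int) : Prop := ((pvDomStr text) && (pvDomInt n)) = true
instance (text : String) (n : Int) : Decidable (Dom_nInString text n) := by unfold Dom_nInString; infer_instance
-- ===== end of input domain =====

-- B replaces A's linear prev/count state machine by a quadratic brute-force scan over
-- candidate start positions, testing each window text[i:i+n] for constancy with differing
-- (or absent) neighbours on both sides (objective: alternative algorithm, not faster).

-- ===== PORT A =====
-- A's loop over range(1, len(text)) carrying prev and count, with an early return.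
def nInStringLoop (l : List Char) (prev : Char) (count : Int) (n : Int) : Bool :=
  match l with
  | [] => count == n
  | c :: rest =>
    if c == prev then nInStringLoop rest prev (count + 1) n
    else if count == n then true
    else nInStringLoop rest c 1 n

def nInString (text : String) (n : Int) : Bool :=
  match text.toList with
  | [] => false          -- Python raises IndexError here (text[0]); excluded by Pre_nInString
  | p :: rest => nInStringLoop rest p 1 n

-- ===== PORT B =====
-- Source B: n >= 1 and any(window at i is constant of length n with differing neighbours).
def nInString_alt (text : String) (n : Int) : Bool :=
  let l := text.toList
  let L : Int := (l.length : Int)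
  decide (1 ≤ n) &&
  (PySem.List.pyRange 0 L 1).any (fun i =>
    decide (i + n ≤ L) &&
    (decide (i = 0) || !(PySem.List.pyGet? l (i - 1) == PySem.List.pyGet? l i)) &&
    ((PySem.List.pyRange i (i + n) 1).all fun j =>
        PySem.List.pyGet? l j == PySem.List.pyGet? l i) &&
    (decide (i + n = L) || !(PySem.List.pyGet? l (i + n) == PySem.List.pyGet? l i)))

-- ===== PRECONDITION & SPEC =====
-- Pre_ excludes only the empty string, on which Python A raises IndexError at text[0].
def Pre_nInString (text : String) (n : Int) : Prop := text ≠ ""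
instance (text : String) (n : Int) : Decidable (Pre_nInString text n) := by unfold Pre_nInString; infer_instance
def pvWitness_nInString : String × Int := ("aabbb", 3)

def Spec_nInString (text : String) (n : Int) (out : Bool) : Prop := out = nInString_alt text n
instance (text : String) (n : Int) (out : Bool) : Decidable (Spec_nInString text n out) := by unfold Spec_nInString; infer_instance

-- ===== CLAIM (what is proved, stated in full; the proofs are below) =====
def Claim_equal_nInString : Prop := ∀ (text : String) (n : Int), Dom_nInString text n → Pre_nInString text n → Spec_nInString text n (nInString text n)

-- ===== LEMMAS AND PROOFS =====

-- maximal run lengths of consecutive equal characters: the common yardstick both ports reduce to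
def runLengths (l : List Char) : List Int :=
  match l with
  | [] => []
  | c :: rest =>
    ((rest.takeWhile (· == c)).length + 1 : Int) :: runLengths (rest.dropWhile (· == c))
termination_by l.length
decreasing_by
  simpa using Nat.lt_succ_of_le (List.length_dropWhile_le _ _)

theorem runLengths_pos (l : List Char) : ∀ r ∈ runLengths l, 1 ≤ r := by
  induction l using runLengths.induct with
  | case1 => simp [runLengths]
  | case2 c rest ih =>
    intro r hr
    rw [runLengths] at hr
    rcases List.mem_cons.mp hr with h | h
    · subst h; omega
    · exact ih r h

-- ---- A's side: the state machine computes any(run == n) ----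

-- A's loop from state (prev, count) answers: does the current run (count chars already seen
-- plus the matching prefix of l) have length n, or does some later maximal run in l?
theorem nInStringLoop_eq (l : List Char) : ∀ (prev : Char) (count n : Int),
    nInStringLoop l prev count n =
      ((((l.takeWhile (· == prev)).length : Int) + count == n)
        || (runLengths (l.dropWhile (· == prev))).any (fun r => r == n)) := by
  induction l with
  | nil => intro prev count n; simp [nInStringLoop, runLengths]
  | cons c rest ih =>
    intro prev count n
    by_cases h : (c == prev) = true
    · simp only [nInStringLoop, h, if_true]
      rw [ih, List.takeWhile_cons_of_pos (p := fun x => x == prev) (a := c) h,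
        List.dropWhile_cons_of_pos (p := fun x => x == prev) (a := c) h]
      have harith : (((rest.takeWhile (· == prev)).length : Int)) + (count + 1)
          = (((c :: rest.takeWhile (· == prev)).length : Int)) + count := by
        simp only [List.length_cons]; push_cast; ring
      rw [harith]
    · have hne : (c == prev) = false := by simpa using h
      simp only [nInStringLoop, hne, Bool.false_eq_true, if_false]
      rw [List.takeWhile_cons_of_neg (p := fun x => x == prev) (a := c) (by simp [hne]),
        List.dropWhile_cons_of_neg (p := fun x => x == prev) (a := c) (by simp [hne])]
      by_cases hcn : count = n
      · simp [hcn, runLengths]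
      · rw [if_neg (by simpa using hcn), ih]
        have h0 : (((0 : Nat) : Int) + count == n) = false := by simpa using hcn
        simp only [runLengths, List.any_cons, List.length_nil, h0, Bool.false_or]

theorem nInString_eq_runs (text : String) (n : Int) :
    nInString text n = (runLengths text.toList).any (fun r => r == n) := by
  unfold nInString
  cases hl : text.toList with
  | nil => simp [runLengths]
  | cons p rest =>
    show nInStringLoop rest p 1 n = _
    rw [nInStringLoop_eq]
    simp [runLengths]

-- ---- B's side ----

-- the window predicate of Source B at start position i, on the Nat level
def winP (l : List Char) (m : Nat) (i : Nat) : Bool :=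
  decide (i + m ≤ l.length) &&
  (decide (i = 0) || !(l[i-1]? == l[i]?)) &&
  ((List.range m).all fun t => l[i+t]? == l[i]?) &&
  (decide (i + m = l.length) || !(l[i+m]? == l[i]?))

theorem alt_nonpos (text : String) (n : Int) (h : n < 1) : nInString_alt text n = false := by
  unfold nInString_alt
  simp [show ¬ (1 ≤ n) by omega]

-- the port of B, for n = (m : Int) with 1 ≤ m, is the Nat-level any-over-winP
theorem alt_pos (text : String) (m : Nat) (hm : 1 ≤ m) :
    nInString_alt text (m : Int) = (List.range text.toList.length).any (winP text.toList m) := by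
  simp only [nInString_alt]
  set l := text.toList with hl
  rw [PySem.List.pyRange_zero_nat l.length, List.any_map]
  have h1 : (decide ((1:Int) ≤ (m:Int))) = true := by simp; exact_mod_cast hm
  rw [h1, Bool.true_and]
  refine List.any_congr rfl ?_
  intro i
  dsimp only [Function.comp]
  show _ = winP l m i
  unfold winP
  have hA : (decide ((i:Int) + (m:Int) ≤ (l.length : Int))) = decide (i + m ≤ l.length) :=
    decide_eq_decide.mpr (by push_cast; omega)
  have hB : (decide ((i:Int) = 0) || !(PySem.List.pyGet? l ((i:Int) - 1) == PySem.List.pyGet? l (i:Int)))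
      = (decide (i = 0) || !(l[i-1]? == l[i]?)) := by
    by_cases h0 : i = 0
    · subst h0; simp
    · have e0 : (decide ((i:Int) = 0)) = false := by simp; exact_mod_cast h0
      rw [e0, decide_eq_false h0, Bool.false_or, Bool.false_or]
      have hi1 : (i:Int) - 1 = ((i - 1 : Nat) : Int) := by
        have h1i : 1 ≤ i := Nat.one_le_iff_ne_zero.mpr h0
        omega
      rw [hi1, PySem.List.pyGet?_natCast, PySem.List.pyGet?_natCast]
  have hC : ((PySem.List.pyRange (i:Int) ((i:Int) + (m:Int)) 1).all fun j =>
        PySem.List.pyGet? l j == PySem.List.pyGet? l (i:Int))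
      = ((List.range m).all fun t => l[i+t]? == l[i]?) := by
    have htn : (((i:Int) + (m:Int)) - (i:Int)).toNat = m := by omega
    rw [PySem.List.pyRange_one, htn, List.all_map]
    refine List.all_congr rfl ?_
    intro t
    dsimp only [Function.comp]
    have hc : (i:Int) + (t:Int) = ((i + t : Nat) : Int) := by push_cast; ring
    rw [hc, PySem.List.pyGet?_natCast, PySem.List.pyGet?_natCast]
  have hD : (decide ((i:Int) + (m:Int) = (l.length : Int)) ||
        !(PySem.List.pyGet? l ((i:Int) + (m:Int)) == PySem.List.pyGet? l (i:Int)))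
      = (decide (i + m = l.length) || !(l[i+m]? == l[i]?)) := by
    have hadd : (i:Int) + (m:Int) = ((i + m : Nat) : Int) := by push_cast; ring
    rw [hadd, PySem.List.pyGet?_natCast, PySem.List.pyGet?_natCast]
    congr 1
    exact decide_eq_decide.mpr (by omega)
  rw [hA, hB, hC, hD]

-- ---- the combinatorial core: winP over all positions decides membership in runLengths ----

-- index facts over the first-run decomposition  l = replicate k c ++ tail
theorem get_run {k : Nat} {c : Char} {tail : List Char} {j : Nat} (hj : j < k) :
    (List.replicate k c ++ tail)[j]? = some c := by
  rw [List.getElem?_append_left (by simpa using hj)]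
  simp [hj]

theorem get_tail {k : Nat} {c : Char} {tail : List Char} (t : Nat) :
    (List.replicate k c ++ tail)[k + t]? = tail[t]? := by
  rw [List.getElem?_append_right (by simp)]
  simp

-- the head of tail (if any) differs from c
def TailOk (c : Char) (tail : List Char) : Prop := ∀ d, tail[0]? = some d → d ≠ c

theorem tail_get_ne {c : Char} {tail : List Char} (h : TailOk c tail) :
    (tail[0]? == some c) = false := by
  cases ht : tail[0]? with
  | none => simp
  | some d => simp [h d ht]

-- (i) position 0 tests exactly "first run has length m"
theorem winP_zero {k m : Nat} {c : Char} {tail : List Char} (hk : 1 ≤ k)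
    (htl : TailOk c tail) :
    winP (List.replicate k c ++ tail) m 0 = decide (k = m) := by
  unfold winP
  have hlen : (List.replicate k c ++ tail).length = k + tail.length := by simp
  have h0 : (List.replicate k c ++ tail)[0]? = some c := get_run hk
  rcases Nat.lt_trichotomy m k with hmk | hmk | hmk
  · -- m < k : window is constant but the char after it is still c → end boundary fails
    have hend1 : (decide (0 + m = (List.replicate k c ++ tail).length)) = false := by
      rw [hlen]; simp; omega
    have hend2 : ((List.replicate k c ++ tail)[0+m]? == (List.replicate k c ++ tail)[0]?) = true := by
      rw [h0, Nat.zero_add, get_run hmk]; simp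
    rw [hend1, hend2]
    simp; omega
  · -- m = k : true
    subst hmk
    have hfront : (decide (0 + m ≤ (List.replicate m c ++ tail).length)) = true := by
      rw [hlen]; simp
    have hall : ((List.range m).all fun t =>
        (List.replicate m c ++ tail)[0+t]? == (List.replicate m c ++ tail)[0]?) = true := by
      rw [List.all_eq_true]
      intro t ht
      rw [h0, Nat.zero_add, get_run (List.mem_range.mp ht)]; simp
    have hend : ((decide (0 + m = (List.replicate m c ++ tail).length)) ||
        !((List.replicate m c ++ tail)[0+m]? == (List.replicate m c ++ tail)[0]?)) = true := by
      cases tail with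
      | nil => rw [hlen]; simp
      | cons d t' =>
        have : (List.replicate m c ++ d :: t')[0+m]? = (d :: t')[0]? := by
          simpa using get_tail (k := m) (c := c) (tail := d :: t') 0
        rw [this, h0, tail_get_ne htl]
        simp
    rw [hfront, hall, hend, h0]
    simp
  · -- k < m : the window leaves the run, the all fails at t = k
    have hall : ((List.range m).all fun t =>
        (List.replicate k c ++ tail)[0+t]? == (List.replicate k c ++ tail)[0]?) = false := by
      rw [List.all_eq_false]
      refine ⟨k, List.mem_range.mpr hmk, ?_⟩
      have : (List.replicate k c ++ tail)[0+k]? = tail[0]? := by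
        simpa using get_tail (k := k) (c := c) (tail := tail) 0
      rw [this, h0, tail_get_ne htl]
      simp
    rw [hall]
    simp; omega

-- (ii) positions strictly inside the first run never start a maximal run
theorem winP_inside {k m : Nat} {c : Char} {tail : List Char} {i : Nat}
    (hi : i + 1 < k) :
    winP (List.replicate k c ++ tail) m (i + 1) = false := by
  unfold winP
  have h1 : (List.replicate k c ++ tail)[i+1-1]? = some c := get_run (by omega)
  have h2 : (List.replicate k c ++ tail)[i+1]? = some c := get_run hi
  rw [h1, h2]
  simp

-- (iii) positions at or past the first run behave as in tail, shifted by k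
theorem winP_shift {k m : Nat} {c : Char} {tail : List Char} (hk : 1 ≤ k)
    (htl : TailOk c tail) (t : Nat) :
    winP (List.replicate k c ++ tail) m (k + t) = winP tail m t := by
  unfold winP
  have hlen : (List.replicate k c ++ tail).length = k + tail.length := by simp
  have hA : (decide (k + t + m ≤ (List.replicate k c ++ tail).length))
      = decide (t + m ≤ tail.length) := by
    rw [hlen]; exact decide_eq_decide.mpr (by omega)
  have hB : (decide (k + t = 0) || !((List.replicate k c ++ tail)[k+t-1]? == (List.replicate k c ++ tail)[k+t]?))
      = (decide (t = 0) || !(tail[t-1]? == tail[t]?)) := by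
    cases t with
    | zero =>
      have hL : (decide (k + 0 = 0)) = false := by simp; omega
      have hc1 : (List.replicate k c ++ tail)[k+0-1]? = some c := by
        simpa using get_run (show k - 1 < k by omega) (c := c) (tail := tail)
      have hc2 : (List.replicate k c ++ tail)[k+0]? = tail[0]? := by
        simpa using get_tail (k := k) (c := c) (tail := tail) 0
      rw [hL, hc1, hc2, Bool.false_or]
      have hne : (some c == tail[0]?) = false := by
        cases htt : tail[0]? with
        | none => simp
        | some d =>
          have hdc := htl d htt
          simp only [beq_eq_false_iff_ne, ne_eq, Option.some.injEq]
          exact fun h => hdc h.symm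
      rw [hne]
      simp
    | succ t' =>
      have hL : (decide (k + (t'+1) = 0)) = false := by simp
      have hR : (decide (t'+1 = 0)) = false := by simp
      have e1 : (List.replicate k c ++ tail)[k+(t'+1)-1]? = tail[t'+1-1]? := by
        have h' : k + (t'+1) - 1 = k + t' := by omega
        rw [h', get_tail]
        simp
      have e2 : (List.replicate k c ++ tail)[k+(t'+1)]? = tail[t'+1]? := get_tail _
      rw [hL, hR, e1, e2]
  have hC : ((List.range m).all fun j => (List.replicate k c ++ tail)[k+t+j]? == (List.replicate k c ++ tail)[k+t]?)
      = ((List.range m).all fun j => tail[t+j]? == tail[t]?) := by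
    refine List.all_congr rfl ?_
    intro j
    have e1 : (List.replicate k c ++ tail)[k+t+j]? = tail[t+j]? := by
      have h' : k + t + j = k + (t + j) := by omega
      rw [h', get_tail]
    have e2 : (List.replicate k c ++ tail)[k+t]? = tail[t]? := get_tail _
    rw [e1, e2]
  have hD : (decide (k + t + m = (List.replicate k c ++ tail).length) ||
        !((List.replicate k c ++ tail)[k+t+m]? == (List.replicate k c ++ tail)[k+t]?))
      = (decide (t + m = tail.length) || !(tail[t+m]? == tail[t]?)) := by
    have e1 : (List.replicate k c ++ tail)[k+t+m]? = tail[t+m]? := by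
      have h' : k + t + m = k + (t + m) := by omega
      rw [h', get_tail]
    have e2 : (List.replicate k c ++ tail)[k+t]? = tail[t]? := get_tail _
    rw [hlen, e1, e2]
    congr 1
    exact decide_eq_decide.mpr (by omega)
  rw [hA, hB, hC, hD]

-- (iv) one peeling step of the any
theorem any_winP_step {k m : Nat} {c : Char} {tail : List Char} (hk : 1 ≤ k)
    (htl : TailOk c tail) :
    (List.range (List.replicate k c ++ tail).length).any (winP (List.replicate k c ++ tail) m)
      = (decide (k = m) || (List.range tail.length).any (winP tail m)) := by
  have hlen : (List.replicate k c ++ tail).length = k + tail.length := by simp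
  rw [hlen, List.range_add, List.any_append, List.any_map]
  have hrun : (List.range k).any (winP (List.replicate k c ++ tail) m) = decide (k = m) := by
    obtain ⟨k', rfl⟩ : ∃ k', k = k' + 1 := ⟨k - 1, by omega⟩
    rw [List.range_succ_eq_map, List.any_cons, List.any_map]
    have : (List.range k').any (winP (List.replicate (k'+1) c ++ tail) m ∘ Nat.succ) = false := by
      rw [List.any_eq_false]
      intro i hi
      have := winP_inside (k := k'+1) (m := m) (c := c) (tail := tail) (i := i)
        (by have := List.mem_range.mp hi; omega)
      simpa using this
    rw [this, winP_zero hk htl, Bool.or_false]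
  rw [hrun]
  congr 1
  refine List.any_congr rfl ?_
  intro t
  exact winP_shift hk htl t

-- the first run of  c :: rest  really is a replicate-prefix with a differing head after it
theorem run_decomp (c : Char) (rest : List Char) :
    c :: rest = List.replicate ((rest.takeWhile (· == c)).length + 1) c
      ++ rest.dropWhile (· == c) := by
  have htw : rest.takeWhile (· == c) = List.replicate (rest.takeWhile (· == c)).length c := by
    apply List.eq_replicate_of_mem
    intro b hb
    simpa using List.mem_takeWhile_imp hb
  rw [List.replicate_succ, List.cons_append]
  congr 1
  conv_lhs => rw [← List.takeWhile_append_dropWhile (p := (· == c)) (l := rest), htw]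

theorem tailOk_dropWhile (c : Char) (rest : List Char) : TailOk c (rest.dropWhile (· == c)) := by
  intro d hd hdc
  have hne : rest.dropWhile (· == c) ≠ [] := by
    intro h; rw [h] at hd; simp at hd
  have hhead := List.head_dropWhile_not (· == c) hne
  have hd' : (rest.dropWhile (· == c)).head? = some d := by
    rw [List.head?_eq_getElem?]; exact hd
  rw [List.head?_eq_some_head hne] at hd'
  have : (rest.dropWhile (· == c)).head hne = d := Option.some_inj.mp hd'
  rw [this, hdc] at hhead
  simp at hhead

-- (v) the core equivalence
theorem any_winP_eq_runs (m : Nat) (l : List Char) :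
    (List.range l.length).any (winP l m) = (runLengths l).any (fun r => r == (m : Int)) := by
  induction l using runLengths.induct with
  | case1 => simp [runLengths]
  | case2 c rest ih =>
    rw [runLengths, List.any_cons]
    set k := (rest.takeWhile (· == c)).length + 1 with hk
    have hdec := run_decomp c rest
    rw [hdec, any_winP_step (by omega) (tailOk_dropWhile c rest), ih]
    congr 1
    show decide (k = m) = (((k : Nat) : Int) + 0 == (m : Int))
    rw [Bool.eq_iff_iff]
    simp

-- ===== VERDICT (by name: the statement is the Claim_ definition above) =====
theorem nInString_spec : Claim_equal_nInString := by
  intro text n _ _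
  unfold Spec_nInString
  rw [nInString_eq_runs]
  rcases lt_or_ge n 1 with hn | hn
  · rw [alt_nonpos text n hn, List.any_eq_false]
    intro r hr
    have := runLengths_pos text.toList r hr
    simp; omega
  · obtain ⟨m, rfl⟩ : ∃ m : Nat, n = (m : Int) := ⟨n.toNat, by omega⟩
    rw [alt_pos text m (by exact_mod_cast hn), any_winP_eq_runs]
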